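-- pv_equiv track=rewrite | github.com/shosato101/CheckiO_Missions | old_solutions/Sort_by_Extention.py | sort_by_ext
-- ===== SOURCE A (Python) =====
-- from typing import List
--
-- def sort_by_ext(files: List[str]) -> List[str]:
--     # your code here
--     name = []
--     ext = []
--     sorted_ext = []
--
--     for i in sorted(files):
--         if len(i[i.rfind("."):]) == 0 or len(i[:i.rfind(".")]) == 0:
--             name.append(i)
--         else:
--             l = i.split(".")
--             ext.append(l)
--
--     for i in sorted(ext, key=lambda val : val[-1]):
--         a = ".".join(i)
--         sorted_ext.append(a)
--
--     return name + sorted_ext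
-- ===== SOURCE B (Python) =====
-- def sort_by_ext(files):
--     def key(f):
--         if len(f[f.rfind("."):]) == 0 or len(f[:f.rfind(".")]) == 0:
--             return ["0", "", f]
--         return ["1", f.split(".")[-1], f]
--     return sorted(files, key=key)
-- ===== Notes on version B (the rewrite author's own statement) =====
-- stated objective: idiomatic
-- what changed: A partitions sorted(files) into name/ext lists, splits each ext file, re-sorts by extension and re-joins; B is a single sorted(files, key=...) call with a composite (category, extension, filename) tuple key and no partition, second sort, split/join round-trip or concatenation.
import Mathlib
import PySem

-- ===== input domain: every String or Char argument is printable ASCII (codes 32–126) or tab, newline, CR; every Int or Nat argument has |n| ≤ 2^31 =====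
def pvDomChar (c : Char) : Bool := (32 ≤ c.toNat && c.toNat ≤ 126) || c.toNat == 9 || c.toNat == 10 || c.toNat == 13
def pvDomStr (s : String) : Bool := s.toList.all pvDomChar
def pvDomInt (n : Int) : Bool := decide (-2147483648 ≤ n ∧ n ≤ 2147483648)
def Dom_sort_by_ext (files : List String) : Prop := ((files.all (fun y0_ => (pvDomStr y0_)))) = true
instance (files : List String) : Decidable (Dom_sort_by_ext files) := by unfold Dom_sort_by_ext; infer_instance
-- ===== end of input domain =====

-- B replaces A's partition + split + second sort + re-join by ONE sorted(files, key=…) call with a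
-- composite (category, extension, filename) key: same results by sort stability, more idiomatic.

-- shared helpers: subexpressions both Pythons contain verbatim
-- len(i[i.rfind("."):]) == 0 or len(i[:i.rfind(".")]) == 0  (the 'goes in the name bucket' test of both programs)
def pvIsName (i : String) : Bool :=
  (PySem.Str.len (PySem.Str.slice i (some (PySem.Str.rfind i ".")) none) == 0) ||
  (PySem.Str.len (PySem.Str.slice i none (some (PySem.Str.rfind i "."))) == 0)

-- l[-1]; every list it is applied to below is a split result, hence nonempty, so the "" default is never used
def pvLast (l : List String) : String := (PySem.List.pyGet? l (-1)).getD ""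

-- i.split(".")  (the separator is nonempty, so split? never returns none and the [] default is never used)
def pvSplit (i : String) : List String := (PySem.Str.split? i ".").getD []

-- ===== PORT A =====
def sort_by_ext (files : List String) : List String :=
  -- name = [] ; ext = [] ; for i in sorted(files): …  (one loop, two accumulators)
  let st := (PySem.List.sorted files (fun x => x) false).foldl
      (fun (acc : List String × List (List String)) i =>
        if pvIsName i then (acc.1 ++ [i], acc.2)
        else (acc.1, acc.2 ++ [pvSplit i])) ([], [])
  -- sorted_ext = [] ; for i in sorted(ext, key=lambda val: val[-1]): sorted_ext.append(".".join(i))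
  let sorted_ext := (PySem.List.sorted st.2 (fun val => pvLast val) false).foldl
      (fun acc i => acc ++ [PySem.Str.join "." i]) []
  st.1 ++ sorted_ext

-- ===== PORT B =====
-- the list key ["0", "", f] / ["1", f.split(".")[-1], f]; Python compares lists lexicographically
def pvKey (f : String) : List String :=
  if pvIsName f then ["0", "", f]
  else ["1", pvLast (pvSplit f), f]

def sort_by_ext_alt (files : List String) : List String :=
  PySem.List.sorted files pvKey false

-- ===== PRECONDITION & SPEC =====
def Spec_sort_by_ext (files : List String) (out : List String) : Prop := out = sort_by_ext_alt files
instance (files : List String) (out : List String) : Decidable (Spec_sort_by_ext files out) := by unfold Spec_sort_by_ext; infer_instance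

-- ===== CLAIM (what is proved, stated in full; the proofs are below) =====
def Claim_equal_sort_by_ext : Prop := ∀ (files : List String), Dom_sort_by_ext files → Spec_sort_by_ext files (sort_by_ext files)

-- ===== LEMMAS AND PROOFS =====

theorem pv_join_cons_ne (sep a : List Char) (t : List (List Char)) (h : t ≠ []) :
    PySem.Chars.join sep (a :: t) = a ++ sep ++ PySem.Chars.join sep t := by
  cases t with
  | nil => exact absurd rfl h
  | cons q r => exact PySem.Chars.join_cons_cons sep a q r

-- '.'.join(ys ++ [a, b]) = '.'.join(ys ++ [a ++ '.' ++ b])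
theorem pv_join_merge (sep : List Char) (ys : List (List Char)) (a b : List Char) :
    PySem.Chars.join sep (ys ++ [a, b]) = PySem.Chars.join sep (ys ++ [a ++ sep ++ b]) := by
  induction ys with
  | nil =>
    simp only [List.nil_append]
    rw [PySem.Chars.join_cons_cons, PySem.Chars.join_singleton, PySem.Chars.join_singleton]
  | cons y ys ih =>
    rw [List.cons_append, List.cons_append,
        pv_join_cons_ne sep y _ (by simp), pv_join_cons_ne sep y _ (by simp), ih]

theorem pv_go_join (fuel : Nat) (l cur : List Char) (acc : List (List Char)) :
    PySem.Chars.join ['.'] (PySem.Chars.splitOn.go ['.'] fuel l cur acc) =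
    PySem.Chars.join ['.'] (acc.reverse ++ [cur.reverse ++ l]) := by
  induction fuel generalizing l cur acc with
  | zero => rw [PySem.Chars.splitOn.go.eq_def]; simp
  | succ fuel ih =>
    cases l with
    | nil => rw [PySem.Chars.splitOn.go.eq_def]; simp
    | cons c rest =>
      rw [PySem.Chars.splitOn.go.eq_def]
      by_cases hc : c = '.'
      · subst hc
        simp only [List.isPrefixOf, Bool.and_true, beq_self_eq_true, if_pos]
        rw [ih]
        simp only [List.length_cons, List.length_nil, List.drop_succ_cons, List.drop_zero,
          List.reverse_cons, List.reverse_nil, List.nil_append]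
        have := pv_join_merge ['.'] acc.reverse cur.reverse rest
        simpa using this
      · have : (['.'].isPrefixOf (c :: rest)) = false := by
          simp [List.isPrefixOf]; exact fun h => absurd h.symm hc
        simp only [this, Bool.false_eq_true, if_false]
        rw [ih]
        simp

theorem pv_join_splitOn (cs : List Char) :
    PySem.Chars.join ['.'] (PySem.Chars.splitOn cs ['.']) = cs := by
  unfold PySem.Chars.splitOn
  rw [pv_go_join]
  simp [PySem.Chars.join_singleton]

-- '.'.join(f.split('.')) == f
theorem pv_join_split (f : String) : PySem.Str.join "." (pvSplit f) = f := by
  have h2 : ("." : String).toList = ['.'] := by decide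
  unfold pvSplit
  rw [PySem.Str.split?]
  simp only [PySem.Chars.split?, h2]
  rw [if_neg (by simp)]
  simp only [Option.map_some, Option.getD_some, PySem.Str.join, h2]
  rw [PySem.Chars.join.eq_1]
  simp only [List.map_map]
  have hto : (String.toList ∘ String.ofList) = id := by funext x; simp
  rw [hto, List.map_id]
  rw [← PySem.Chars.join.eq_1, pv_join_splitOn]
  simp

-- stability of PySem's insertion sort: if xs is already ordered by R, key-ties in sorted xs key keep R
theorem pv_insertBy_stable {α κ : Type} [LinearOrder κ] (key : α → κ) (R : α → α → Prop)
    (x : α) (acc : List α)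
    (hp : acc.Pairwise (fun a b => key a < key b ∨ (key a = key b ∧ R a b)))
    (hR : ∀ y ∈ acc, R y x) :
    (PySem.List.insertBy (fun a b => decide (key a < key b)) x acc).Pairwise
      (fun a b => key a < key b ∨ (key a = key b ∧ R a b)) := by
  induction acc with
  | nil => simp [PySem.List.insertBy]
  | cons y ys ih =>
    rw [PySem.List.insertBy]
    by_cases h : key x < key y
    · rw [if_pos (by simpa using h)]
      refine List.Pairwise.cons ?_ hp
      intro z hz
      rcases List.mem_cons.mp hz with rfl | hz
      · exact Or.inl h
      · rcases (List.rel_of_pairwise_cons hp hz) with h2 | h2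
        · exact Or.inl (h.trans h2)
        · exact Or.inl (h.trans_le (le_of_eq h2.1))
    · rw [if_neg (by simpa using h)]
      refine List.Pairwise.cons ?_ (ih (List.Pairwise.of_cons hp) (fun z hz => hR z (List.mem_cons_of_mem _ hz)))
      intro z hz
      rw [PySem.List.mem_insertBy] at hz
      rcases hz with rfl | hz
      · rcases lt_or_eq_of_le (le_of_not_gt h) with h2 | h2
        · exact Or.inl h2
        · exact Or.inr ⟨h2, hR y (List.mem_cons_self)⟩
      · exact List.rel_of_pairwise_cons hp hz

theorem pv_foldl_insertBy_stable {α κ : Type} [LinearOrder κ] (key : α → κ) (R : α → α → Prop)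
    (xs acc : List α)
    (hxs : xs.Pairwise R)
    (hacc : acc.Pairwise (fun a b => key a < key b ∨ (key a = key b ∧ R a b)))
    (hcross : ∀ y ∈ acc, ∀ x ∈ xs, R y x) :
    (xs.foldl (fun acc x => PySem.List.insertBy (fun a b => decide (key a < key b)) x acc) acc).Pairwise
      (fun a b => key a < key b ∨ (key a = key b ∧ R a b)) := by
  induction xs generalizing acc with
  | nil => exact hacc
  | cons x xs ih =>
    rw [List.foldl_cons]
    apply ih
    case hxs => exact List.Pairwise.of_cons hxs
    case hacc => exact pv_insertBy_stable key R x acc hacc (fun y hy => hcross y hy x List.mem_cons_self)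
    intro y hy x' hx'
    rw [PySem.List.mem_insertBy] at hy
    rcases hy with rfl | hy
    · exact List.rel_of_pairwise_cons hxs hx'
    · exact hcross y hy x' (List.mem_cons_of_mem _ hx')

theorem pv_sorted_stable {α κ : Type} [LinearOrder κ] (key : α → κ) (R : α → α → Prop)
    (xs : List α) (hxs : xs.Pairwise R) :
    (PySem.List.sorted xs key false).Pairwise
      (fun a b => key a < key b ∨ (key a = key b ∧ R a b)) := by
  rw [PySem.List.sorted_eq_foldl_insertBy]
  exact pv_foldl_insertBy_stable key R xs [] hxs (by simp) (by simp)

-- A's result, written as filter/map/sort of sorted(files)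
theorem pv_A_shape (files : List String) :
    sort_by_ext files =
      ((PySem.List.sorted files (fun x => x) false).filter pvIsName) ++
      ((PySem.List.sorted
          (((PySem.List.sorted files (fun x => x) false).filter (fun i => !pvIsName i)).map pvSplit)
          (fun val => pvLast val) false).map (fun i => PySem.Str.join "." i)) := by
  unfold sort_by_ext
  have hfun : (fun (acc : List String × List (List String)) i =>
      if pvIsName i then (acc.1 ++ [i], acc.2) else (acc.1, acc.2 ++ [pvSplit i])) =
      (fun acc i => ((fun a j => if pvIsName j then a ++ [j] else a) acc.1 i,
                     (fun a j => if !pvIsName j then a ++ [pvSplit j] else a) acc.2 i)) := by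
    funext acc i
    by_cases h : pvIsName i <;> simp [h]
  simp only [hfun]
  rw [PySem.List.foldl_prod_mk (f := fun a j => if pvIsName j then a ++ [j] else a)
        (g := fun a j => if !pvIsName j then a ++ [pvSplit j] else a)]
  rw [PySem.List.foldl_append_if_eq_filter, PySem.List.foldl_append_if,
      PySem.List.foldl_append_singleton_eq_map]
  simp

theorem pv_zero_lt_one_str : ("0" : String) < "1" := by
  rw [String.lt_iff_toList_lt]
  exact List.cons_lt_cons_iff.mpr (Or.inl (by decide))

theorem pv_key_injective : Function.Injective pvKey := by
  intro f g h
  unfold pvKey at h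
  by_cases hf : pvIsName f <;> by_cases hg : pvIsName g <;>
    simp only [hf, hg, if_true, if_false, Bool.false_eq_true, List.cons.injEq, and_true] at h
  · exact h.2.2
  · exact absurd h.1 (by decide)
  · exact absurd h.1 (by decide)
  · exact h.2.2

-- every element of A's second block is the split of an un-named file
theorem pv_mem_ext (files : List String) (a : List String)
    (ha : a ∈ PySem.List.sorted
        (((PySem.List.sorted files (fun x => x) false).filter (fun i => !pvIsName i)).map pvSplit)
        (fun val => pvLast val) false) :
    ∃ f, pvIsName f = false ∧ a = pvSplit f := by
  rw [PySem.List.mem_sorted] at ha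
  rcases List.mem_map.mp ha with ⟨f, hf, rfl⟩
  exact ⟨f, by simpa using (List.mem_filter.mp hf).2, rfl⟩

theorem pv_A_pairwise (files : List String) :
    (sort_by_ext files).Pairwise (fun a b => pvKey a ≤ pvKey b) := by
  rw [pv_A_shape]
  set s := PySem.List.sorted files (fun x => x) false with hs
  have hsp : s.Pairwise (fun a b => a ≤ b) := PySem.List.sorted_pairwise files (fun x => x)
  rw [List.pairwise_append]
  refine ⟨?_, ?_, ?_⟩
  · -- name block: alphabetical, category 0
    refine (hsp.filter pvIsName).imp_of_mem ?_
    intro a b ha hb hab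
    have hPa : pvIsName a := (List.mem_filter.mp ha).2
    have hPb : pvIsName b := (List.mem_filter.mp hb).2
    unfold pvKey
    rw [if_pos hPa, if_pos hPb]
    rcases lt_or_eq_of_le hab with h | rfl
    · exact le_of_lt (List.cons_lt_cons_iff.mpr (Or.inr ⟨rfl,
        List.cons_lt_cons_iff.mpr (Or.inr ⟨rfl, List.cons_lt_cons_iff.mpr (Or.inl h)⟩)⟩))
    · exact le_refl _
  · -- ext block: by extension, alphabetical ties by stability, category 1
    rw [List.pairwise_map]
    have hext : (((s.filter (fun i => !pvIsName i)).map pvSplit)).Pairwise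
        (fun a b => PySem.Str.join "." a ≤ PySem.Str.join "." b) := by
      rw [List.pairwise_map]
      refine (hsp.filter _).imp ?_
      intro a b hab
      rw [pv_join_split, pv_join_split]
      exact hab
    have hst := pv_sorted_stable (fun val => pvLast val)
        (fun a b => PySem.Str.join "." a ≤ PySem.Str.join "." b) _ hext
    refine hst.imp_of_mem ?_
    intro a b ha hb hab
    rcases pv_mem_ext files a ha with ⟨f, hPf, rfl⟩
    rcases pv_mem_ext files b hb with ⟨g, hPg, rfl⟩
    rw [pv_join_split, pv_join_split]
    simp only [pv_join_split] at hab
    unfold pvKey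
    rw [if_neg (by simp [hPf]), if_neg (by simp [hPg])]
    rcases hab with h | ⟨heq, hle⟩
    · exact le_of_lt (List.cons_lt_cons_iff.mpr (Or.inr ⟨rfl,
        List.cons_lt_cons_iff.mpr (Or.inl h)⟩))
    · rcases lt_or_eq_of_le hle with h | rfl
      · exact le_of_lt (List.cons_lt_cons_iff.mpr (Or.inr ⟨rfl,
          List.cons_lt_cons_iff.mpr (Or.inr ⟨heq, List.cons_lt_cons_iff.mpr (Or.inl h)⟩)⟩))
      · rw [heq]
  · -- cross: category 0 < category 1
    intro a ha b hb
    have hPa : pvIsName a := (List.mem_filter.mp ha).2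
    rcases List.mem_map.mp hb with ⟨bb, hbb, rfl⟩
    rcases pv_mem_ext files bb hbb with ⟨g, hPg, rfl⟩
    rw [pv_join_split]
    unfold pvKey
    rw [if_pos hPa, if_neg (by simp [hPg])]
    exact le_of_lt (List.cons_lt_cons_iff.mpr (Or.inl pv_zero_lt_one_str))

theorem pv_A_perm (files : List String) : (sort_by_ext files).Perm files := by
  rw [pv_A_shape]
  set s := PySem.List.sorted files (fun x => x) false with hs
  have h1 : (PySem.List.sorted ((s.filter (fun i => !pvIsName i)).map pvSplit)
      (fun val => pvLast val) false).Perm ((s.filter (fun i => !pvIsName i)).map pvSplit) :=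
    PySem.List.sorted_perm _ _ _
  have h2 := h1.map (fun i => PySem.Str.join "." i)
  have h3 : ((s.filter (fun i => !pvIsName i)).map pvSplit).map (fun i => PySem.Str.join "." i)
      = s.filter (fun i => !pvIsName i) := by
    rw [List.map_map]
    have : ∀ a ∈ s.filter (fun i => !pvIsName i),
        ((fun i => PySem.Str.join "." i) ∘ pvSplit) a = id a := fun a _ => pv_join_split a
    rw [List.map_congr_left this, List.map_id]
  rw [h3] at h2
  exact ((List.Perm.append_left (s.filter pvIsName) h2).trans
    (List.filter_append_perm pvIsName s)).trans (PySem.List.sorted_perm files (fun x => x) false)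

-- B's sorted call and the sorted of the order-theoretic lemmas use propositionally equal, not
-- definitionally equal, Decidable instances on List String; this congruence lemma bridges them.
theorem pv_sorted_congr {α κ : Type} (i1 i2 : LT κ) (d1 : @DecidableLT κ i1) (d2 : @DecidableLT κ i2)
    (h : ∀ a b, @LT.lt κ i1 a b ↔ @LT.lt κ i2 a b) (xs : List α) (key : α → κ) :
    @PySem.List.sorted α κ i1 d1 xs key false = @PySem.List.sorted α κ i2 d2 xs key false := by
  unfold PySem.List.sorted
  have hb : (fun (a b : α) => @decide (@LT.lt κ i1 (key a) (key b)) (d1 (key a) (key b))) =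
      (fun (a b : α) => @decide (@LT.lt κ i2 (key a) (key b)) (d2 (key a) (key b))) := by
    funext a b
    exact decide_eq_decide.mpr (h _ _)
  simp only [if_neg (by decide : ¬ (false = true))]
  rw [hb]

-- ===== VERDICT (by name: the statement is the Claim_ definition above) =====
theorem sort_by_ext_spec : Claim_equal_sort_by_ext := by
  intro files _
  unfold Spec_sort_by_ext sort_by_ext_alt
  rw [pv_sorted_congr List.instLT
      (@Preorder.toLT _ (@PartialOrder.toPreorder _ (@LinearOrder.toPartialOrder _ List.instLinearOrder)))
      List.decidableLT (@LinearOrder.toDecidableLT _ List.instLinearOrder)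
      (fun a b => List.lt_iff_lex_lt a b) files pvKey]
  exact PySem.List.eq_of_perm_of_pairwise_le_of_injective pvKey pv_key_injective
    ((pv_A_perm files).trans
      ((@PySem.List.sorted_perm String (List String)
        (@Preorder.toLT _ (@PartialOrder.toPreorder _ (@LinearOrder.toPartialOrder _ List.instLinearOrder)))
        (@LinearOrder.toDecidableLT _ List.instLinearOrder) files pvKey false).symm))
    (pv_A_pairwise files) (PySem.List.sorted_pairwise files pvKey)
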